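-- pv_equiv track=rewrite | github.com/codeuntilcold/decision-tree-using-hadoop | MRAttributeSelect.py | count_within_value
-- ===== SOURCE A (Python) =====
-- def count_within_value(list_of_tuples):
--     mp = {}
--     for val, class_val in list_of_tuples:
--         if val not in mp:
--             mp[val] = {class_val: 1}
--         else:
--             if class_val not in mp[val]:
--                 mp[val][class_val] = 1
--             else:
--                 mp[val][class_val] += 1
--     return mp
-- ===== SOURCE B (Python) =====
-- def count_within_value(list_of_tuples):
--     # Pass 1: flat count of whole (val, class_val) pairs.
--     counts = {}
--     for pair in list_of_tuples:
--         counts[pair] = counts.get(pair, 0) + 1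
--     # Pass 2: reshape the flat table into the nested dict.
--     mp = {}
--     for (val, class_val), n in counts.items():
--         mp.setdefault(val, {})[class_val] = n
--     return mp
-- ===== Notes on version B (the rewrite author's own statement) =====
-- stated objective: alternative
-- what changed: Replaces A's incremental nested-dict updates (membership tests and in-place increments per element) with two flat passes: first a flat counter keyed by the whole (val, class) pair, then a single reshape pass that writes each final count once into the nested dict.
import Mathlib
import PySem

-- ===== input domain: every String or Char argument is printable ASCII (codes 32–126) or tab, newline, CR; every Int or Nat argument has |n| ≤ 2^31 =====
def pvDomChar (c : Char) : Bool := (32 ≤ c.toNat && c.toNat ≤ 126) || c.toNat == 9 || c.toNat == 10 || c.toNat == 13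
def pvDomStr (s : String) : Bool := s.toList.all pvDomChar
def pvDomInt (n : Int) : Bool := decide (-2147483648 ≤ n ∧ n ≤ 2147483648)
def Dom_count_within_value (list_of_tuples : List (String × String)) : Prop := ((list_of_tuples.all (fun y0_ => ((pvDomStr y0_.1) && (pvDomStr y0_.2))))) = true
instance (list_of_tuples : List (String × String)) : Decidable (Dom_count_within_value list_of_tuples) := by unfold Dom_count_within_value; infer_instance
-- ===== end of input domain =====

-- B replaces A's incremental nested-dict updates with a flat count of whole pairs
-- followed by a reshape pass (alternative decomposition, same cost).

-- ===== PORT A =====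
-- one loop step of A; Python mutates the inner dict in place, which under value
-- semantics is re-inserting the updated inner dict (overwrite keeps the position)
def pvStepA (mp : PySem.Dict String (PySem.Dict String Int)) (pr : String × String) :
    PySem.Dict String (PySem.Dict String Int) :=
  if mp.contains pr.1 = false then
    mp.insert pr.1 (PySem.Dict.empty.insert pr.2 1)
  else
    if (mp.getD pr.1 PySem.Dict.empty).contains pr.2 = false then
      mp.insert pr.1 ((mp.getD pr.1 PySem.Dict.empty).insert pr.2 1)
    else
      mp.insert pr.1 ((mp.getD pr.1 PySem.Dict.empty).insert pr.2
        ((mp.getD pr.1 PySem.Dict.empty).getD pr.2 0 + 1))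

def count_within_value (list_of_tuples : List (String × String)) : List (String × List (String × Int)) :=
  (list_of_tuples.foldl pvStepA PySem.Dict.empty).items.map (fun pr => (pr.1, pr.2.items))

-- ===== PORT B =====
-- reshape step: mp.setdefault(val, {})[class_val] = n
def pvStepB (mp : PySem.Dict String (PySem.Dict String Int)) (q : (String × String) × Int) :
    PySem.Dict String (PySem.Dict String Int) :=
  mp.insert q.1.1 ((mp.getD q.1.1 PySem.Dict.empty).insert q.1.2 q.2)

def count_within_value_alt (list_of_tuples : List (String × String)) : List (String × List (String × Int)) :=
  let counts := list_of_tuples.foldl (fun d pr => d.modify pr 0 (· + 1)) PySem.Dict.empty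
  let mp := counts.items.foldl pvStepB PySem.Dict.empty
  mp.items.map (fun pr => (pr.1, pr.2.items))

-- ===== PRECONDITION & SPEC =====
def Spec_count_within_value (list_of_tuples : List (String × String)) (out : List (String × List (String × Int))) : Prop := out = count_within_value_alt list_of_tuples
instance (list_of_tuples : List (String × String)) (out : List (String × List (String × Int))) : Decidable (Spec_count_within_value list_of_tuples out) := by unfold Spec_count_within_value; infer_instance

-- ===== CLAIM (what is proved, stated in full; the proofs are below) =====
def Claim_equal_count_within_value : Prop := ∀ (list_of_tuples : List (String × String)), Dom_count_within_value list_of_tuples → Spec_count_within_value list_of_tuples (count_within_value list_of_tuples)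

-- ===== LEMMAS AND PROOFS =====

theorem pv_dict_ext {κ ν : Type} (x y : PySem.Dict κ ν) (h : x.items = y.items) : x = y := by
  cases x; cases y; cases h; rfl

-- "bump": a pvStepB whose stored count is one more than currently stored (0 if absent)
def pvBump (mp : PySem.Dict String (PySem.Dict String Int)) (p : String × String) :
    PySem.Dict String (PySem.Dict String Int) :=
  pvStepB mp (p, (mp.getD p.1 PySem.Dict.empty).getD p.2 0 + 1)

theorem pvStepA_eq_bump (mp : PySem.Dict String (PySem.Dict String Int)) (p : String × String) :
    pvStepA mp p = pvBump mp p := by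
  dsimp only [pvStepA, pvBump, pvStepB]
  by_cases h1 : mp.contains p.1 = false
  · rw [if_pos h1, PySem.Dict.getD_of_not_contains _ _ h1]
    norm_num [PySem.Dict.getD_empty]
  · rw [if_neg h1]
    by_cases h2 : (mp.getD p.1 PySem.Dict.empty).contains p.2 = false
    · rw [if_pos h2, PySem.Dict.getD_of_not_contains _ _ h2]
      norm_num
    · rw [if_neg h2]

theorem pv_insert_insert_same {κ ν : Type} [BEq κ] [LawfulBEq κ] (d : PySem.Dict κ ν) (k : κ) (a b : ν) :
    (d.insert k a).insert k b = d.insert k b := by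
  apply pv_dict_ext
  have h1 : (d.insert k a).contains k = true := PySem.Dict.contains_insert_self d k a
  by_cases hc : d.contains k = true
  · rw [PySem.Dict.items_insert_of_contains _ b h1, PySem.Dict.items_insert_of_contains _ a hc,
        PySem.Dict.items_insert_of_contains _ b hc, List.map_map]
    apply List.map_congr_left
    intro q _
    by_cases h3 : (q.1 == k) = true
    · simp [h3]
    · simp [h3]
  · have hcf : d.contains k = false := by simpa using hc
    rw [PySem.Dict.items_insert_of_contains _ b h1, PySem.Dict.items_insert_of_not_contains _ a hcf,
        PySem.Dict.items_insert_of_not_contains _ b hcf, List.map_append]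
    have hall : ∀ q ∈ d.items, (q.1 == k) = false := by
      intro q hq
      by_contra hx
      have hx' : (q.1 == k) = true := by simpa using hx
      have hany : d.items.any (fun r => r.1 == k) = true := by
        rw [List.any_eq_true]; exact ⟨q, hq, hx'⟩
      have hanyf : d.items.any (fun r => r.1 == k) = false := hcf
      rw [hanyf] at hany
      exact Bool.false_ne_true hany
    congr 1
    · have hid : List.map (fun p => if (p.1 == k) = true then (k, b) else p) d.items
          = List.map id d.items :=
        List.map_congr_left (fun q hq => by simp [hall q hq])
      rw [hid, List.map_id]
    · simp

theorem pv_insert_comm_of_contains {κ ν : Type} [BEq κ] [LawfulBEq κ] (d : PySem.Dict κ ν)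
    (k k' : κ) (a b : ν) (hc : d.contains k = true) (hne : k' ≠ k) :
    (d.insert k a).insert k' b = (d.insert k' b).insert k a := by
  apply pv_dict_ext
  have hkk' : (k == k') = false := beq_eq_false_iff_ne.mpr (fun h => hne h.symm)
  have hk'k : (k' == k) = false := beq_eq_false_iff_ne.mpr hne
  by_cases hk'c : d.contains k' = true
  · have h1 : (d.insert k a).contains k' = true := by
      rw [PySem.Dict.contains_insert]; simp [hk'c]
    have h2 : (d.insert k' b).contains k = true := by
      rw [PySem.Dict.contains_insert]; simp [hc]
    rw [PySem.Dict.items_insert_of_contains _ b h1, PySem.Dict.items_insert_of_contains _ a hc,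
        PySem.Dict.items_insert_of_contains _ a h2, PySem.Dict.items_insert_of_contains _ b hk'c,
        List.map_map, List.map_map]
    apply List.map_congr_left
    intro q _
    simp only [Function.comp_apply]
    by_cases h3 : (q.1 == k) = true
    · have h4 : (q.1 == k') = false := by rw [eq_of_beq h3]; exact hkk'
      have hne' : k ≠ k' := fun h => hne h.symm
      simp [h3, h4, hne']
    · by_cases h5 : (q.1 == k') = true
      · simp [h3, h5, hne]
      · simp [h3, h5]
  · have hk'f : d.contains k' = false := by simpa using hk'c
    have h1 : (d.insert k a).contains k' = false := by
      rw [PySem.Dict.contains_insert]; simp [hk'k, hk'f]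
    have h2 : (d.insert k' b).contains k = true := by
      rw [PySem.Dict.contains_insert]; simp [hc]
    rw [PySem.Dict.items_insert_of_not_contains _ b h1, PySem.Dict.items_insert_of_contains _ a hc,
        PySem.Dict.items_insert_of_contains _ a h2, PySem.Dict.items_insert_of_not_contains _ b hk'f,
        List.map_append]
    simp [hk'k]

-- whether the inner dict at p.1 has key p.2 is unchanged by a pvStepB at a different pair
theorem pvStepB_inner_contains (mp : PySem.Dict String (PySem.Dict String Int))
    (q : (String × String) × Int) (p : String × String) (hq : q.1 ≠ p) :
    (((pvStepB mp q).getD p.1 PySem.Dict.empty).contains p.2) =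
      ((mp.getD p.1 PySem.Dict.empty).contains p.2) := by
  obtain ⟨⟨a, b⟩, n⟩ := q
  obtain ⟨c, d⟩ := p
  dsimp only [pvStepB] at *
  by_cases h : c = a
  · subst h
    rw [PySem.Dict.getD_insert_self, PySem.Dict.contains_insert]
    have hbd : ¬ (d = b) := fun hdb => hq (by rw [hdb])
    simp [hbd]
  · rw [PySem.Dict.getD_insert_of_ne _ _ _ h]

theorem pv_fold_not_contains (its : List ((String × String) × Int))
    (mp : PySem.Dict String (PySem.Dict String Int)) (p : String × String)
    (h : ∀ q ∈ its, q.1 ≠ p)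
    (h0 : ((mp.getD p.1 PySem.Dict.empty).contains p.2) = false) :
    (((its.foldl pvStepB mp).getD p.1 PySem.Dict.empty).contains p.2) = false := by
  induction its generalizing mp with
  | nil => exact h0
  | cons q its ih =>
    simp only [List.foldl_cons]
    exact ih (pvStepB mp q) (fun r hr => h r (List.mem_cons_of_mem _ hr))
      (by rw [pvStepB_inner_contains mp q p (h q (by simp))]; exact h0)

theorem pvStepB_comm (mp : PySem.Dict String (PySem.Dict String Int))
    (q : (String × String) × Int) (p : String × String) (hq : q.1 ≠ p)
    (hc : ((mp.getD p.1 PySem.Dict.empty).contains p.2) = true) :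
    pvStepB (pvBump mp p) q = pvBump (pvStepB mp q) p := by
  obtain ⟨⟨a, b⟩, n⟩ := q
  obtain ⟨c, d⟩ := p
  dsimp only [pvBump, pvStepB] at *
  have hcp : mp.contains c = true := by
    by_cases hx : mp.contains c = true
    · exact hx
    · exfalso
      have hx' : mp.contains c = false := by simpa using hx
      rw [PySem.Dict.getD_of_not_contains _ _ hx', PySem.Dict.contains_empty] at hc
      exact Bool.false_ne_true hc
  by_cases hac : a = c
  · subst hac
    have hbd : ¬ (b = d) := fun hbd => hq (by rw [hbd])
    rw [PySem.Dict.getD_insert_self, PySem.Dict.getD_insert_self,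
        PySem.Dict.getD_insert_of_ne _ _ _ (fun h => hbd h.symm),
        pv_insert_insert_same, pv_insert_insert_same]
    exact congrArg _ (pv_insert_comm_of_contains _ d b _ n hc hbd)
  · rw [PySem.Dict.getD_insert_of_ne _ _ _ hac,
        PySem.Dict.getD_insert_of_ne _ _ _ (fun h => hac h.symm)]
    exact pv_insert_comm_of_contains mp c a _ _ hcp hac

theorem pv_fold_bump_comm (its : List ((String × String) × Int))
    (mp : PySem.Dict String (PySem.Dict String Int)) (p : String × String)
    (h : ∀ q ∈ its, q.1 ≠ p)
    (hc : ((mp.getD p.1 PySem.Dict.empty).contains p.2) = true) :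
    its.foldl pvStepB (pvBump mp p) = pvBump (its.foldl pvStepB mp) p := by
  induction its generalizing mp with
  | nil => rfl
  | cons q its ih =>
    simp only [List.foldl_cons]
    rw [pvStepB_comm mp q p (h q (by simp)) hc]
    exact ih (pvStepB mp q) (fun r hr => h r (List.mem_cons_of_mem _ hr))
      (by rw [pvStepB_inner_contains mp q p (h q (by simp))]; exact hc)

theorem pv_fold_replace (its : List ((String × String) × Int))
    (mp : PySem.Dict String (PySem.Dict String Int)) (p : String × String) (n : Int)
    (hnd : (its.map (·.1)).Nodup) (hmem : (p, n) ∈ its)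
    (h0 : ((mp.getD p.1 PySem.Dict.empty).contains p.2) = false) :
    (its.map (fun q => if (q.1 == p) = true then (p, n + 1) else q)).foldl pvStepB mp =
      pvBump (its.foldl pvStepB mp) p := by
  induction its generalizing mp with
  | nil => exact absurd hmem (by simp)
  | cons q its ih =>
    by_cases hqp : (q.1 == p) = true
    · have hq1 : q.1 = p := eq_of_beq hqp
      have hnd' := hnd
      simp only [List.map_cons] at hnd'
      rw [hq1] at hnd'
      obtain ⟨h1, h2⟩ := List.nodup_cons.mp hnd'
      have hnotin : ∀ r ∈ its, r.1 ≠ p := fun r hr hrp => h1 (hrp ▸ List.mem_map_of_mem hr)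
      have hqn : q = (p, n) := by
        rcases List.mem_cons.mp hmem with heq | hin
        · exact heq.symm
        · exact absurd rfl (hnotin (p, n) hin)
      subst hqn
      simp only [List.map_cons, List.foldl_cons]
      rw [if_pos (by simp)]
      have htail : its.map (fun r => if (r.1 == p) = true then (p, n + 1) else r)
          = its.map id :=
        List.map_congr_left (fun r hr => by simp [hnotin r hr])
      rw [htail, List.map_id]
      have hstep : pvStepB mp ((p, n).1, n + 1) = pvBump (pvStepB mp (p, n)) p := by
        dsimp only [pvBump, pvStepB]
        rw [PySem.Dict.getD_insert_self, PySem.Dict.getD_insert_self,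
            pv_insert_insert_same, pv_insert_insert_same]
      rw [hstep]
      have hc2 : (((pvStepB mp (p, n)).getD p.1 PySem.Dict.empty).contains p.2) = true := by
        dsimp only [pvStepB]
        rw [PySem.Dict.getD_insert_self]
        exact PySem.Dict.contains_insert_self _ _ _
      exact pv_fold_bump_comm its (pvStepB mp (p, n)) p hnotin hc2
    · have hq1 : q.1 ≠ p := fun h => hqp (by simp [h])
      simp only [List.map_cons, List.foldl_cons, if_neg hqp]
      have hmem' : (p, n) ∈ its := by
        rcases List.mem_cons.mp hmem with heq | hin
        · exact absurd (by rw [← heq]) hq1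
        · exact hin
      have hnd' : (its.map (·.1)).Nodup := by
        simp only [List.map_cons] at hnd
        exact (List.nodup_cons.mp hnd).2
      exact ih (pvStepB mp q) hnd' hmem'
        (by rw [pvStepB_inner_contains mp q p hq1]; exact h0)

theorem pv_modify_eq (d : PySem.Dict (String × String) Int) (k : String × String) :
    d.modify k 0 (· + 1) = d.insert k (d.getD k 0 + 1) := rfl

theorem pv_main (L : List (String × String)) :
    ((L.foldl (fun d pr => d.modify pr (0 : Int) (· + 1)) PySem.Dict.empty).items).foldl pvStepB PySem.Dict.empty =
      L.foldl pvStepA PySem.Dict.empty := by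
  induction L using List.reverseRecOn with
  | nil => rfl
  | append_singleton L p ih =>
    rw [List.foldl_append, List.foldl_append]
    simp only [List.foldl_cons, List.foldl_nil]
    rw [pv_modify_eq]
    set C := L.foldl (fun d pr => d.modify pr (0 : Int) (· + 1)) PySem.Dict.empty with hC
    have hCC : C = PySem.Dict.counter L := hC.trans (PySem.Dict.counter_eq_foldl L).symm
    by_cases hc : C.contains p = true
    · have hsome : (C.get? p).isSome = true := by
        rw [← PySem.Dict.contains_eq_isSome_get?]; exact hc
      obtain ⟨v, hv⟩ := Option.isSome_iff_exists.mp hsome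
      have hgd : C.getD p 0 = v := PySem.Dict.getD_of_get?_eq_some _ _ hv
      have hm : (p, v) ∈ C.items := PySem.Dict.mem_items_of_get?_eq_some C hv
      have hnd : (C.items.map (·.1)).Nodup := by
        have hn := PySem.Dict.nodup_keys_counter L
        rw [← hCC] at hn
        exact hn
      rw [hgd, PySem.Dict.items_insert_of_contains _ (v + 1) hc]
      rw [pv_fold_replace C.items PySem.Dict.empty p v hnd hm
            (by rw [PySem.Dict.getD_empty, PySem.Dict.contains_empty]),
          ih, ← pvStepA_eq_bump]
    · have hcf : C.contains p = false := by simpa using hc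
      have hgd : C.getD p 0 = 0 := PySem.Dict.getD_of_not_contains _ _ hcf
      have hnotin : ∀ q ∈ C.items, q.1 ≠ p := by
        intro q hq hqp
        have hx' : (q.1 == p) = true := by simp [hqp]
        have hany : C.items.any (fun r => r.1 == p) = true := by
          rw [List.any_eq_true]; exact ⟨q, hq, hx'⟩
        have hanyf : C.items.any (fun r => r.1 == p) = false := hcf
        rw [hanyf] at hany
        exact Bool.false_ne_true hany
      have h0f : (((C.items.foldl pvStepB PySem.Dict.empty).getD p.1 PySem.Dict.empty).contains p.2) = false :=
        pv_fold_not_contains C.items PySem.Dict.empty p hnotin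
          (by rw [PySem.Dict.getD_empty, PySem.Dict.contains_empty])
      rw [hgd, PySem.Dict.items_insert_of_not_contains _ ((0 : Int) + 1) hcf,
          List.foldl_append]
      simp only [List.foldl_cons, List.foldl_nil]
      have hbump : pvStepB (C.items.foldl pvStepB PySem.Dict.empty) (p, (0 : Int) + 1) =
          pvBump (C.items.foldl pvStepB PySem.Dict.empty) p := by
        dsimp only [pvBump, pvStepB]
        rw [PySem.Dict.getD_of_not_contains _ _ h0f]
      rw [hbump, ih, ← pvStepA_eq_bump]

-- ===== VERDICT (by name: the statement is the Claim_ definition above) =====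
theorem count_within_value_spec : Claim_equal_count_within_value := by
  intro l _
  simp only [Spec_count_within_value, count_within_value, count_within_value_alt]
  rw [pv_main]
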